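-- pv_equiv track=rewrite | github.com/cjrzs/MyLeetCode | Coderforces/dfs/1829E. The Lakes.py | func
-- ===== SOURCE A (Python) =====
-- def func(nums, n, m):
--     dx, dy = [0, -1, 0, 1], [1, 0, -1, 0]
--
--     def bfs(x, y):
--         res = nums[x][y]
--         nums[x][y] = 0
--         q = [(x, y)]
--         while q:
--             x, y = q.pop()
--             for i in range(4):
--                 a = x + dx[i]
--                 b = y + dy[i]
--                 if 0 <= a < n and 0 <= b < m and nums[a][b] != 0:
--                     res += nums[a][b]
--                     nums[a][b] = 0
--                     q.append((a, b))
--         return res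
--     res = 0
--     for i in range(n):
--         for j in range(m):
--             if nums[i][j] != 0:
--                 res = max(res, bfs(i, j))
--     return res
-- ===== SOURCE B (Python) =====
-- def func(nums, n, m):
--     # Recursive depth-first flood fill: no worklist (stack/queue) at all; the
--     # call stack carries the traversal.  dfs(x, y) reads the cell, zeroes it,
--     # and returns its value plus the dfs-sums of its in-bounds nonzero
--     # neighbours.  Mutates nums exactly like A (visited cells become 0).
--     def dfs(x, y):
--         total = nums[x][y]
--         nums[x][y] = 0
--         for a, b in ((x, y + 1), (x - 1, y), (x, y - 1), (x + 1, y)):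
--             if 0 <= a < n and 0 <= b < m and nums[a][b] != 0:
--                 total += dfs(a, b)
--         return total
--
--     best = 0
--     for i in range(n):
--         for j in range(m):
--             if nums[i][j] != 0:
--                 best = max(best, dfs(i, j))
--     return best
-- ===== Notes on version B (the rewrite author's own statement) =====
-- stated objective: alternative
-- what changed: A's iterative flood fill with an explicit LIFO worklist (push neighbours, pop and accumulate in a while loop) is replaced by a recursive depth-first flood fill with no worklist data structure at all: dfs(x,y) zeroes the cell and returns its value plus the recursive sums of its in-bounds nonzero neighbours, the call stack replacing the explicit stack.
import Mathlib
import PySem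

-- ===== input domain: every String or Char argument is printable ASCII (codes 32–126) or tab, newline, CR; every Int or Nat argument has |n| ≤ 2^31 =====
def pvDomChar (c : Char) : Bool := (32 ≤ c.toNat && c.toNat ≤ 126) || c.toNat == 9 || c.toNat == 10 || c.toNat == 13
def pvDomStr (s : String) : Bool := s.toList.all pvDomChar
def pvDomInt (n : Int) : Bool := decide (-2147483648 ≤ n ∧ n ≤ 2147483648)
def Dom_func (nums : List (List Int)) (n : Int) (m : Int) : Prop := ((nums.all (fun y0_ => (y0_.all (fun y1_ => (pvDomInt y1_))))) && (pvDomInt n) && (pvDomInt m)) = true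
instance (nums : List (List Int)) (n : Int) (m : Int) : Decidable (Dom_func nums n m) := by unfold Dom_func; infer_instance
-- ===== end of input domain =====

-- B replaces A's explicit-LIFO-worklist flood fill by a recursive depth-first flood fill (no
-- worklist data structure; alternative decomposition, same cost). Both Pythons mutate nums
-- identically (visited cells zeroed); the theorems are about the returned value.

-- ===== PORT A =====
-- Both ports model the mutated grid `nums` as a function Int → Int → Int (exact for all cells the
-- Python reads under Pre_func); writing nums[a][b] = 0 is the pointwise update pvUpd.
def pvGridOf (nums : List (List Int)) : Int → Int → Int :=
  fun i j => (nums.getD i.toNat []).getD j.toNat 0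

def pvUpd (g : Int → Int → Int) (a b : Int) : Int → Int → Int :=
  fun x y => if x = a ∧ y = b then 0 else g x y

-- A's inner conditional: `if 0 <= a < n and 0 <= b < m and nums[a][b] != 0: res += …; zero; push`
def pvVisit (n m : Int) (st : Int × List (Int × Int) × (Int → Int → Int)) (a b : Int) :
    Int × List (Int × Int) × (Int → Int → Int) :=
  if 0 ≤ a ∧ a < n ∧ 0 ≤ b ∧ b < m ∧ st.2.2 a b ≠ 0 then
    (st.1 + st.2.2 a b, (a, b) :: st.2.1, pvUpd st.2.2 a b)
  else st

-- number of nonzero in-bounds cells: termination measure for both flood fills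
def pvCnt (n m : Int) (g : Int → Int → Int) : Nat :=
  ∑ i ∈ Finset.range n.toNat, ∑ j ∈ Finset.range m.toNat, (if g (i : Int) (j : Int) ≠ 0 then 1 else 0)

lemma pvSum2_single {β : Type} [AddCommMonoid β] (N M A B : Nat) (hA : A < N) (hB : B < M)
    (k k' : Nat → Nat → β) (h : ∀ i j, ¬(i = A ∧ j = B) → k i j = k' i j) :
    (∑ i ∈ Finset.range N, ∑ j ∈ Finset.range M, k i j) + k' A B
      = (∑ i ∈ Finset.range N, ∑ j ∈ Finset.range M, k' i j) + k A B := by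
  have hAm : A ∈ Finset.range N := Finset.mem_range.mpr hA
  have hBm : B ∈ Finset.range M := Finset.mem_range.mpr hB
  have e1 : ∀ (f : Nat → Nat → β), (∑ i ∈ Finset.range N, ∑ j ∈ Finset.range M, f i j)
      = (∑ i ∈ (Finset.range N).erase A, ∑ j ∈ Finset.range M, f i j)
        + ((∑ j ∈ (Finset.range M).erase B, f A j) + f A B) := by
    intro f
    rw [← Finset.sum_erase_add _ _ hAm, ← Finset.sum_erase_add _ _ hBm]
  rw [e1 k, e1 k']
  have h2 : (∑ i ∈ (Finset.range N).erase A, ∑ j ∈ Finset.range M, k i j)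
      = ∑ i ∈ (Finset.range N).erase A, ∑ j ∈ Finset.range M, k' i j := by
    refine Finset.sum_congr rfl (fun i hi => Finset.sum_congr rfl (fun j _ => ?_))
    exact h i j (by rintro ⟨rfl, rfl⟩; exact (Finset.mem_erase.mp hi).1 rfl)
  have h3 : (∑ j ∈ (Finset.range M).erase B, k A j)
      = ∑ j ∈ (Finset.range M).erase B, k' A j := by
    refine Finset.sum_congr rfl (fun j hj => ?_)
    exact h A j (by rintro ⟨-, rfl⟩; exact (Finset.mem_erase.mp hj).1 rfl)
  rw [h2, h3]; abel

lemma pvCnt_upd (n m a b : Int) (g : Int → Int → Int)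
    (h0 : 0 ≤ a) (h1 : a < n) (h2 : 0 ≤ b) (h3 : b < m) (hnz : g a b ≠ 0) :
    pvCnt n m (pvUpd g a b) + 1 = pvCnt n m g := by
  have hA : a.toNat < n.toNat := by omega
  have hB : b.toNat < m.toNat := by omega
  have ha : ((a.toNat : Int)) = a := Int.toNat_of_nonneg h0
  have hb : ((b.toNat : Int)) = b := Int.toNat_of_nonneg h2
  have := pvSum2_single n.toNat m.toNat a.toNat b.toNat hA hB
    (fun i j => if pvUpd g a b (i : Int) (j : Int) ≠ 0 then 1 else 0)
    (fun i j => if g (i : Int) (j : Int) ≠ 0 then 1 else 0)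
    (by
      intro i j hij
      have : ¬((i : Int) = a ∧ (j : Int) = b) := by
        rintro ⟨rfl, rfl⟩; exact hij ⟨by omega, by omega⟩
      simp [pvUpd, this])
  simp only [ha, hb] at this
  simpa [pvCnt, pvUpd, hnz] using this

lemma pvVisit_m5 (n m a b : Int) (st : Int × List (Int × Int) × (Int → Int → Int)) :
    pvCnt n m (pvVisit n m st a b).2.2 * 5 + (pvVisit n m st a b).2.1.length
      ≤ pvCnt n m st.2.2 * 5 + st.2.1.length := by
  unfold pvVisit
  split
  · rename_i h
    obtain ⟨ha, hb, hc, hd, he⟩ := h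
    have := pvCnt_upd n m a b st.2.2 ha hb hc hd he
    simp only [List.length_cons]
    omega
  · exact le_refl _

lemma pvFoldMeas {α σ : Type} (meas : σ → Nat) (step : σ → α → σ)
    (h : ∀ s x, meas (step s x) ≤ meas s) :
    ∀ (l : List α) (s : σ), meas (List.foldl step s l) ≤ meas s := by
  intro l
  induction l with
  | nil => intro s; simp
  | cons x t ih => intro s; exact le_trans (ih (step s x)) (h s x)

def pvDx : List Int := [0, -1, 0, 1]
def pvDy : List Int := [1, 0, -1, 0]

-- A's while-loop: q with top at the head (push = cons, q.pop() = take the head)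
def pvBfsLoop (n m : Int) (res : Int) (q : List (Int × Int)) (g : Int → Int → Int) :
    Int × (Int → Int → Int) :=
  match q with
  | [] => (res, g)
  | (x, y) :: rest =>
    let st := (List.range 4).foldl
      (fun st i => pvVisit n m st (x + pvDx.getD i 0) (y + pvDy.getD i 0)) (res, rest, g)
    pvBfsLoop n m st.1 st.2.1 st.2.2
termination_by pvCnt n m g * 5 + q.length
decreasing_by
  have h := pvFoldMeas (fun s => pvCnt n m s.2.2 * 5 + s.2.1.length)
    (fun st i => pvVisit n m st (x + pvDx.getD i 0) (y + pvDy.getD i 0))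
    (fun s i => pvVisit_m5 n m (x + pvDx.getD i 0) (y + pvDy.getD i 0) s)
    (List.range 4) (res, rest, g)
  dsimp only at h
  simp only [List.length_cons]
  omega

def pvBfs (n m : Int) (g : Int → Int → Int) (x y : Int) : Int × (Int → Int → Int) :=
  pvBfsLoop n m (g x y) [(x, y)] (pvUpd g x y)

def func (nums : List (List Int)) (n : Int) (m : Int) : Int :=
  ((List.range n.toNat).foldl (fun (st : Int × (Int → Int → Int)) i =>
    (List.range m.toNat).foldl (fun st j =>
      if st.2 (i : Int) (j : Int) ≠ 0 then
        let r := pvBfs n m st.2 (i : Int) (j : Int)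
        (max st.1 r.1, r.2)
      else st) st) (0, pvGridOf nums)).1

-- ===== PORT B =====
-- the neighbour tuple ((x,y+1),(x-1,y),(x,y-1),(x+1,y)) of Source B's for-loop
def pvNbrs (c : Int × Int) : List (Int × Int) :=
  [(c.1, c.2 + 1), (c.1 - 1, c.2), (c.1, c.2 - 1), (c.1 + 1, c.2)]

-- Source B's recursion `dfs` (pvDfsF) with its for-loop over the neighbours (pvDfsN).
-- `fuel` is only a totality guard (Python recursion has no such counter): as proved in
-- pvDfsF_spec, with fuel ≥ pvCnt (the number of nonzero in-bounds cells, as supplied by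
-- func_alt) the base case `fuel = 0` is never reached.
mutual
def pvDfsF (n m : Int) : Nat → (Int → Int → Int) → Int → Int → Int × (Int → Int → Int)
  | 0, g, _, _ => (0, g)
  | fuel + 1, g, x, y => pvDfsN n m fuel (pvNbrs (x, y)) (g x y) (pvUpd g x y)
termination_by fuel g x y => (fuel, 0)

def pvDfsN (n m : Int) (fuel : Nat) :
    List (Int × Int) → Int → (Int → Int → Int) → Int × (Int → Int → Int)
  | [], total, g => (total, g)
  | d :: t, total, g =>
    if 0 ≤ d.1 ∧ d.1 < n ∧ 0 ≤ d.2 ∧ d.2 < m ∧ g d.1 d.2 ≠ 0 then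
      let r := pvDfsF n m fuel g d.1 d.2
      pvDfsN n m fuel t (total + r.1) r.2
    else pvDfsN n m fuel t total g
termination_by l total g => (fuel, l.length + 1)
end

def func_alt (nums : List (List Int)) (n : Int) (m : Int) : Int :=
  ((List.range n.toNat).foldl (fun (st : Int × (Int → Int → Int)) i =>
    (List.range m.toNat).foldl (fun st j =>
      if st.2 (i : Int) (j : Int) ≠ 0 then
        let r := pvDfsF n m (pvCnt n m st.2) st.2 (i : Int) (j : Int)
        (max st.1 r.1, r.2)
      else st) st) (0, pvGridOf nums)).1

-- ===== PRECONDITION & SPEC =====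
-- Pre_func holds exactly when Python A returns: when m > 0 the loops read nums[i][j] for every
-- 0 ≤ i < n, 0 ≤ j < m, so A raises IndexError iff m > 0 and n exceeds len(nums) or one of the
-- first n rows is shorter than m (when m ≤ 0 the inner loop body never runs and nothing is read);
-- nothing on which A returns is excluded.
def Pre_func (nums : List (List Int)) (n : Int) (m : Int) : Prop :=
  0 < m → n.toNat ≤ nums.length ∧ ∀ row ∈ nums.take n.toNat, m.toNat ≤ row.length
instance (nums : List (List Int)) (n : Int) (m : Int) : Decidable (Pre_func nums n m) := by
  unfold Pre_func; infer_instance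

def pvWitness_func : List (List Int) × Int × Int := ([[1, 0], [2, 3]], 2, 2)

def Spec_func (nums : List (List Int)) (n : Int) (m : Int) (out : Int) : Prop := out = func_alt nums n m
instance (nums : List (List Int)) (n : Int) (m : Int) (out : Int) : Decidable (Spec_func nums n m out) := by unfold Spec_func; infer_instance

-- ===== CLAIM (what is proved, stated in full; the proofs are below) =====
def Claim_equal_func : Prop := ∀ (nums : List (List Int)) (n : Int) (m : Int), Dom_func nums n m → Pre_func nums n m → Spec_func nums n m (func nums n m)

-- ===== LEMMAS AND PROOFS =====

-- total value of the in-bounds cells; both flood fills return pvT (before) - pvT (after)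
def pvT (n m : Int) (g : Int → Int → Int) : Int :=
  ∑ i ∈ Finset.range n.toNat, ∑ j ∈ Finset.range m.toNat, g (i : Int) (j : Int)

lemma pvT_upd (n m a b : Int) (g : Int → Int → Int)
    (h0 : 0 ≤ a) (h1 : a < n) (h2 : 0 ≤ b) (h3 : b < m) :
    pvT n m (pvUpd g a b) = pvT n m g - g a b := by
  have hA : a.toNat < n.toNat := by omega
  have hB : b.toNat < m.toNat := by omega
  have ha : ((a.toNat : Int)) = a := Int.toNat_of_nonneg h0
  have hb : ((b.toNat : Int)) = b := Int.toNat_of_nonneg h2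
  have := pvSum2_single n.toNat m.toNat a.toNat b.toNat hA hB
    (fun i j => pvUpd g a b (i : Int) (j : Int))
    (fun i j => g (i : Int) (j : Int))
    (by
      intro i j hij
      have : ¬((i : Int) = a ∧ (j : Int) = b) := by
        rintro ⟨rfl, rfl⟩; exact hij ⟨by omega, by omega⟩
      simp [pvUpd, this])
  simp only [ha, hb] at this
  rw [show pvUpd g a b a b = 0 by simp [pvUpd]] at this
  unfold pvT
  omega

-- cells reachable from s through in-bounds cells that are nonzero in the original grid G
inductive pvReach (n m : Int) (G : Int → Int → Int) (s : Int × Int) : Int × Int → Prop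
  | refl : pvReach n m G s s
  | step {c d : Int × Int} : pvReach n m G s c → d ∈ pvNbrs c →
      0 ≤ d.1 → d.1 < n → 0 ≤ d.2 → d.2 < m → G d.1 d.2 ≠ 0 → pvReach n m G s d

lemma pvReach_src {n m : Int} {G : Int → Int → Int} {s c : Int × Int}
    (h : pvReach n m G s c) : c = s ∨ G c.1 c.2 ≠ 0 := by
  cases h with
  | refl => exact Or.inl rfl
  | step _ _ _ _ _ _ hz => exact Or.inr hz

-- a g-reachability path from d extends a G-reachability path to d, when g only shrinks support
lemma pvReach_lift {n m : Int} {G g : Int → Int → Int} {s d e : Int × Int}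
    (hbase : pvReach n m G s d) (hsub : ∀ a b : Int, g a b ≠ 0 → G a b ≠ 0)
    (h : pvReach n m g d e) : pvReach n m G s e := by
  induction h with
  | refl => exact hbase
  | step _ hmem h1 h2 h3 h4 hz ih => exact pvReach.step ih hmem h1 h2 h3 h4 (hsub _ _ hz)

-- the flood-fill postcondition, shared by both sides (q = A's pending stack; [] when done):
-- the grid differs from G only by zeroing reachable cells, pending cells are zeroed grid cells,
-- every zeroed-or-source cell not pending has all its in-bounds neighbours zeroed, source zeroed
def pvInv (n m : Int) (G : Int → Int → Int) (s : Int × Int)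
    (q : List (Int × Int)) (g : Int → Int → Int) : Prop :=
  (∀ a b : Int, g a b ≠ G a b → g a b = 0 ∧ pvReach n m G s (a, b)) ∧
  (∀ c ∈ q, g c.1 c.2 = 0 ∧ (c = s ∨ G c.1 c.2 ≠ 0)) ∧
  (∀ c : Int × Int, (c = s ∨ (G c.1 c.2 ≠ 0 ∧ g c.1 c.2 = 0)) → c ∉ q →
    ∀ d ∈ pvNbrs c, 0 ≤ d.1 → d.1 < n → 0 ≤ d.2 → d.2 < m → g d.1 d.2 = 0) ∧
  g s.1 s.2 = 0

lemma pvZ_reach {n m : Int} {G : Int → Int → Int} {s c : Int × Int} {g : Int → Int → Int}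
    (h1 : ∀ a b : Int, g a b ≠ G a b → g a b = 0 ∧ pvReach n m G s (a, b))
    (hz : c = s ∨ (G c.1 c.2 ≠ 0 ∧ g c.1 c.2 = 0)) : pvReach n m G s c := by
  rcases hz with rfl | ⟨hG, hg⟩
  · exact pvReach.refl
  · have := (h1 c.1 c.2 (by rw [hg]; exact fun h => hG h.symm)).2
    simpa using this

-- ===== A-side: the stack loop establishes pvInv =====

-- core lemma about folding pvVisit over (a sublist of) the neighbour candidates of a cell c
lemma pvCoreFold (n m : Int) (G : Int → Int → Int) (s c : Int × Int)
    (hreach : pvReach n m G s c) :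
    ∀ (cands : List (Int × Int)), (∀ d ∈ cands, d ∈ pvNbrs c) →
    ∀ (res : Int) (qs : List (Int × Int)) (g : Int → Int → Int),
    (∀ a b : Int, g a b ≠ G a b → g a b = 0 ∧ pvReach n m G s (a, b)) →
    ∃ (res' : Int) (q' : List (Int × Int)) (g' : Int → Int → Int) (ps : List (Int × Int)),
      cands.foldl (fun st d => pvVisit n m st d.1 d.2) (res, qs, g) = (res', q', g') ∧
      q' = ps ++ qs ∧
      (∀ a b : Int, g' a b ≠ G a b → g' a b = 0 ∧ pvReach n m G s (a, b)) ∧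
      (∀ d ∈ ps, g' d.1 d.2 = 0 ∧ G d.1 d.2 ≠ 0) ∧
      (∀ d ∈ cands, 0 ≤ d.1 → d.1 < n → 0 ≤ d.2 → d.2 < m → g' d.1 d.2 = 0) ∧
      (∀ a b : Int, g a b = 0 → g' a b = 0) ∧
      (∀ a b : Int, g' a b = 0 → g a b = 0 ∨ (a, b) ∈ ps) ∧
      res' = res + (pvT n m g - pvT n m g') := by
  intro cands
  induction cands with
  | nil =>
    intro _ res qs g H1
    exact ⟨res, qs, g, [], rfl, by simp, H1, by simp, by simp, fun a b h => h,
      fun a b h => Or.inl h, by ring⟩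
  | cons d t ih =>
    intro hadj res qs g H1
    have hdn : d ∈ pvNbrs c := hadj d (by simp)
    by_cases hcond : 0 ≤ d.1 ∧ d.1 < n ∧ 0 ≤ d.2 ∧ d.2 < m ∧ g d.1 d.2 ≠ 0
    · obtain ⟨hc1, hc2, hc3, hc4, hc5⟩ := hcond
      have hGd : G d.1 d.2 ≠ 0 := by
        by_cases hne : g d.1 d.2 = G d.1 d.2
        · rw [← hne]; exact hc5
        · exact absurd (H1 _ _ hne).1 hc5
      have hrd : pvReach n m G s d := pvReach.step hreach hdn hc1 hc2 hc3 hc4 hGd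
      have hstep : (pvVisit n m (res, qs, g) d.1 d.2)
          = (res + g d.1 d.2, d :: qs, pvUpd g d.1 d.2) := by
        simp [pvVisit, hc1, hc2, hc3, hc4, hc5]
      have H1' : ∀ a b : Int, pvUpd g d.1 d.2 a b ≠ G a b →
          pvUpd g d.1 d.2 a b = 0 ∧ pvReach n m G s (a, b) := by
        intro a b hne
        by_cases hab : a = d.1 ∧ b = d.2
        · obtain ⟨rfl, rfl⟩ := hab
          exact ⟨by simp [pvUpd], by simpa using hrd⟩
        · rw [show pvUpd g d.1 d.2 a b = g a b from by simp [pvUpd, hab]] at hne ⊢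
          exact H1 a b hne
      obtain ⟨res', q', g', ps, heq, hq, K1, K3, K4, K5, K6, K7⟩ :=
        ih (fun e he => hadj e (by simp [he])) (res + g d.1 d.2) (d :: qs) (pvUpd g d.1 d.2) H1'
      refine ⟨res', q', g', ps ++ [d], ?_, ?_, K1, ?_, ?_, ?_, ?_, ?_⟩
      · rw [List.foldl_cons, hstep]; exact heq
      · rw [hq]; simp
      · intro e he
        rcases List.mem_append.mp he with he | he
        · exact K3 e he
        · simp only [List.mem_singleton] at he; subst he
          exact ⟨K5 _ _ (by simp [pvUpd]), hGd⟩
      · intro e he he1 he2 he3 he4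
        rcases List.mem_cons.mp he with rfl | he
        · exact K5 _ _ (by simp [pvUpd])
        · exact K4 e he he1 he2 he3 he4
      · intro a b hz
        refine K5 a b ?_
        simp only [pvUpd]
        split
        · rfl
        · exact hz
      · intro a b hz
        rcases K6 a b hz with h | h
        · by_cases hab : a = d.1 ∧ b = d.2
          · obtain ⟨rfl, rfl⟩ := hab
            right; simp
          · left
            rw [show pvUpd g d.1 d.2 a b = g a b from by simp [pvUpd, hab]] at h
            exact h
        · right; exact List.mem_append.mpr (Or.inl h)
      · rw [K7, pvT_upd n m d.1 d.2 g hc1 hc2 hc3 hc4]; ring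
    · have hstep : (pvVisit n m (res, qs, g) d.1 d.2) = (res, qs, g) := by
        simp only [pvVisit]
        rw [if_neg hcond]
      obtain ⟨res', q', g', ps, heq, hq, K1, K3, K4, K5, K6, K7⟩ :=
        ih (fun e he => hadj e (by simp [he])) res qs g H1
      refine ⟨res', q', g', ps, ?_, hq, K1, K3, ?_, K5, K6, K7⟩
      · rw [List.foldl_cons, hstep]; exact heq
      · intro e he he1 he2 he3 he4
        rcases List.mem_cons.mp he with rfl | he
        · have hz : g e.1 e.2 = 0 := by
            by_contra hnz; exact hcond ⟨he1, he2, he3, he4, hnz⟩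
          exact K5 _ _ hz
        · exact K4 e he he1 he2 he3 he4

lemma pvInv_preserve (n m : Int) (G : Int → Int → Int) (s c : Int × Int)
    (P ps : List (Int × Int)) (g g' : Int → Int → Int)
    (hInv : pvInv n m G s (c :: P) g)
    (h1 : ∀ a b : Int, g' a b ≠ G a b → g' a b = 0 ∧ pvReach n m G s (a, b))
    (h3 : ∀ d ∈ ps, g' d.1 d.2 = 0 ∧ G d.1 d.2 ≠ 0)
    (h4 : ∀ d ∈ pvNbrs c, 0 ≤ d.1 → d.1 < n → 0 ≤ d.2 → d.2 < m → g' d.1 d.2 = 0)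
    (h5 : ∀ a b : Int, g a b = 0 → g' a b = 0)
    (h6 : ∀ a b : Int, g' a b = 0 → g a b = 0 ∨ (a, b) ∈ ps) :
    pvInv n m G s (ps ++ P) g' := by
  obtain ⟨H1, H2, H3, H4⟩ := hInv
  refine ⟨h1, ?_, ?_, h5 _ _ H4⟩
  · intro d hd
    rcases List.mem_append.mp hd with hd | hd
    · obtain ⟨hz, hG⟩ := h3 d hd
      exact ⟨hz, Or.inr hG⟩
    · obtain ⟨hz, ho⟩ := H2 d (List.mem_cons_of_mem _ hd)
      exact ⟨h5 _ _ hz, ho⟩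
  · intro e hze he d hd hd1 hd2 hd3 hd4
    by_cases hec : e = c
    · subst hec; exact h4 d hd hd1 hd2 hd3 hd4
    · have hz' : e = s ∨ (G e.1 e.2 ≠ 0 ∧ g e.1 e.2 = 0) := by
        rcases hze with rfl | ⟨hG, hg'⟩
        · exact Or.inl rfl
        · rcases h6 _ _ hg' with h | h
          · exact Or.inr ⟨hG, h⟩
          · exact absurd (List.mem_append.mpr (Or.inl (by simpa using h))) he
      have hnotin : e ∉ (c :: P) := by
        intro hmem
        rcases List.mem_cons.mp hmem with h | h
        · exact hec h
        · exact he (List.mem_append.mpr (Or.inr h))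
      exact h5 _ _ (H3 e hz' hnotin d hd hd1 hd2 hd3 hd4)

lemma pvRange4_fold (n m x y : Int) (st : Int × List (Int × Int) × (Int → Int → Int)) :
    (List.range 4).foldl
      (fun st i => pvVisit n m st (x + pvDx.getD i 0) (y + pvDy.getD i 0)) st
      = (pvNbrs (x, y)).foldl (fun st d => pvVisit n m st d.1 d.2) st := by
  show (List.foldl _ st [0, 1, 2, 3]) = _
  simp only [List.foldl_cons, List.foldl_nil, pvNbrs, pvDx, pvDy, List.getD]
  norm_num
  rw [show x + -1 = x - 1 from by ring, show y + -1 = y - 1 from by ring]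

lemma pvBfsLoop_spec (n m : Int) (G : Int → Int → Int) (s : Int × Int) :
    ∀ (res : Int) (q : List (Int × Int)) (g : Int → Int → Int),
    pvInv n m G s q g →
    pvInv n m G s [] (pvBfsLoop n m res q g).2 ∧
    (pvBfsLoop n m res q g).1 = res + (pvT n m g - pvT n m (pvBfsLoop n m res q g).2) := by
  intro res q g
  induction res, q, g using pvBfsLoop.induct n m with
  | case1 res g =>
    intro hInv
    rw [pvBfsLoop]
    exact ⟨hInv, by ring⟩
  | case2 res g x y rest st ih =>
    intro hInv
    have hz0 := (hInv.2.1 (x, y) (by simp))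
    have hreach : pvReach n m G s (x, y) := by
      refine pvZ_reach hInv.1 ?_
      rcases hz0.2 with h | h
      · exact Or.inl h
      · exact Or.inr ⟨h, hz0.1⟩
    obtain ⟨res', q', g', ps, heq, hq, K1, K3, K4, K5, K6, K7⟩ :=
      pvCoreFold n m G s (x, y) hreach (pvNbrs (x, y)) (fun d h => h) res rest g hInv.1
    have hInv' : pvInv n m G s q' g' := by
      rw [hq]
      exact pvInv_preserve n m G s (x, y) rest ps g g' hInv K1 K3 K4 K5 K6
    have hst : st = (res', q', g') := (pvRange4_fold n m x y (res, rest, g)).trans heq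
    have hunf : pvBfsLoop n m res ((x, y) :: rest) g = pvBfsLoop n m st.1 st.2.1 st.2.2 := by
      rw [pvBfsLoop]
    rw [hunf]
    rw [hst] at ih ⊢
    simp only at ih ⊢
    obtain ⟨ih1, ih2⟩ := ih hInv'
    refine ⟨ih1, ?_⟩
    rw [ih2, K7]
    ring

lemma pvInv_init (n m : Int) (G : Int → Int → Int) (x y : Int) :
    pvInv n m G (x, y) [(x, y)] (pvUpd G x y) := by
  refine ⟨?_, ?_, ?_, by simp [pvUpd]⟩
  · intro a b hne
    by_cases h : a = x ∧ b = y
    · obtain ⟨rfl, rfl⟩ := h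
      exact ⟨by simp [pvUpd], pvReach.refl⟩
    · rw [show pvUpd G x y a b = G a b from by simp [pvUpd, h]] at hne
      exact absurd rfl hne
  · intro c hc
    simp only [List.mem_singleton] at hc; subst hc
    exact ⟨by simp [pvUpd], Or.inl rfl⟩
  · intro c hz hc d hd h1 h2 h3 h4
    simp only [List.mem_singleton] at hc
    rcases hz with rfl | ⟨hG, hg⟩
    · exact absurd rfl hc
    · exfalso
      have hne : ¬(c.1 = x ∧ c.2 = y) := by
        rintro ⟨h5, h6⟩
        exact hc (Prod.ext h5 h6)
      rw [show pvUpd G x y c.1 c.2 = G c.1 c.2 from by simp [pvUpd, hne]] at hg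
      exact hG hg

-- ===== B-side: the recursive DFS establishes the same pvInv =====

lemma pvCnt_mono (n m : Int) (g g' : Int → Int → Int)
    (h : ∀ a b : Int, g' a b ≠ g a b → g' a b = 0) : pvCnt n m g' ≤ pvCnt n m g := by
  unfold pvCnt
  refine Finset.sum_le_sum (fun i _ => Finset.sum_le_sum (fun j _ => ?_))
  by_cases hz : g' (i : Int) (j : Int) = 0
  · simp [hz]
  · have : g' (i : Int) (j : Int) = g (i : Int) (j : Int) := by
      by_contra hne; exact hz (h _ _ hne)
    rw [this]

lemma pvCnt_pos (n m x y : Int) (g : Int → Int → Int)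
    (h0 : 0 ≤ x) (h1 : x < n) (h2 : 0 ≤ y) (h3 : y < m) (hnz : g x y ≠ 0) :
    1 ≤ pvCnt n m g := by
  unfold pvCnt
  have hA : x.toNat ∈ Finset.range n.toNat := Finset.mem_range.mpr (by omega)
  have hB : y.toNat ∈ Finset.range m.toNat := Finset.mem_range.mpr (by omega)
  have hone : (1 : Nat)
      ≤ ∑ j ∈ Finset.range m.toNat, (if g ((x.toNat : Nat) : Int) ((j : Nat) : Int) ≠ 0 then 1 else 0) := by
    have := Finset.single_le_sum
      (f := fun j : Nat => if g ((x.toNat : Nat) : Int) ((j : Nat) : Int) ≠ 0 then 1 else 0)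
      (fun j _ => Nat.zero_le _) hB
    simpa [Int.toNat_of_nonneg h0, Int.toNat_of_nonneg h2, hnz] using this
  have houter := Finset.single_le_sum
    (f := fun i : Nat => ∑ j ∈ Finset.range m.toNat, (if g ((i : Nat) : Int) ((j : Nat) : Int) ≠ 0 then 1 else 0))
    (fun i _ => Nat.zero_le _) hA
  exact le_trans hone houter

-- the for-loop of Source B's dfs, under the induction hypothesis for the recursive calls:
-- it extends the invariant relative to the outer original grid G and source s, where the
-- neighbours still pending in t play the role of A's worklist
lemma pvDfsN_spec (n m : Int) (fuel : Nat) (G : Int → Int → Int) (s : Int × Int)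
    (IH : ∀ (g : Int → Int → Int) (x y : Int), 0 ≤ x → x < n → 0 ≤ y → y < m →
      g x y ≠ 0 → pvCnt n m g ≤ fuel →
      pvInv n m g (x, y) [] (pvDfsF n m fuel g x y).2 ∧
      (pvDfsF n m fuel g x y).1 = pvT n m g - pvT n m (pvDfsF n m fuel g x y).2) :
    ∀ (t : List (Int × Int)), (∀ d ∈ t, d ∈ pvNbrs s) →
    ∀ (total : Int) (g : Int → Int → Int),
    (∀ a b : Int, g a b ≠ G a b → g a b = 0 ∧ pvReach n m G s (a, b)) →
    (∀ c : Int × Int, (c = s ∨ (G c.1 c.2 ≠ 0 ∧ g c.1 c.2 = 0)) →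
      ∀ d ∈ pvNbrs c, 0 ≤ d.1 → d.1 < n → 0 ≤ d.2 → d.2 < m →
        g d.1 d.2 = 0 ∨ (c = s ∧ d ∈ t)) →
    g s.1 s.2 = 0 →
    pvCnt n m g ≤ fuel →
    pvInv n m G s [] (pvDfsN n m fuel t total g).2 ∧
    (pvDfsN n m fuel t total g).1
      = total + (pvT n m g - pvT n m (pvDfsN n m fuel t total g).2) := by
  intro t
  induction t with
  | nil =>
    intro _ total g I1 I2 I3 _
    rw [pvDfsN]
    refine ⟨⟨I1, by simp, ?_, I3⟩, by ring⟩
    intro c hc _ d hd h1 h2 h3 h4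
    rcases I2 c hc d hd h1 h2 h3 h4 with h | ⟨_, h⟩
    · exact h
    · simp at h
  | cons d t ih =>
    intro hsub total g I1 I2 I3 Icnt
    rw [pvDfsN]
    by_cases hcond : 0 ≤ d.1 ∧ d.1 < n ∧ 0 ≤ d.2 ∧ d.2 < m ∧ g d.1 d.2 ≠ 0
    · rw [if_pos hcond]
      show pvInv n m G s []
          (pvDfsN n m fuel t (total + (pvDfsF n m fuel g d.1 d.2).1) (pvDfsF n m fuel g d.1 d.2).2).2 ∧
        (pvDfsN n m fuel t (total + (pvDfsF n m fuel g d.1 d.2).1) (pvDfsF n m fuel g d.1 d.2).2).1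
          = total + (pvT n m g - pvT n m
              (pvDfsN n m fuel t (total + (pvDfsF n m fuel g d.1 d.2).1) (pvDfsF n m fuel g d.1 d.2).2).2)
      obtain ⟨h1, h2, h3, h4, h5⟩ := hcond
      have hgd_eq : g d.1 d.2 = G d.1 d.2 := by
        by_contra h; exact h5 (I1 _ _ h).1
      have hGd : G d.1 d.2 ≠ 0 := by rw [← hgd_eq]; exact h5
      have hreach_d : pvReach n m G s d :=
        pvReach.step pvReach.refl (hsub d (by simp)) h1 h2 h3 h4 hGd
      obtain ⟨⟨P1, _, P3, P4⟩, Pacc⟩ := IH g d.1 d.2 h1 h2 h3 h4 h5 Icnt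
      have hper : ∀ a b : Int, g a b = 0 → (pvDfsF n m fuel g d.1 d.2).2 a b = 0 := by
        intro a b hz
        by_cases he : (pvDfsF n m fuel g d.1 d.2).2 a b = g a b
        · rw [he, hz]
        · exact (P1 a b he).1
      have hsubz : ∀ a b : Int, g a b ≠ 0 → G a b ≠ 0 := by
        intro a b h
        have : g a b = G a b := by by_contra hne; exact h (I1 a b hne).1
        rw [← this]; exact h
      have hI1' : ∀ a b : Int, (pvDfsF n m fuel g d.1 d.2).2 a b ≠ G a b →
          (pvDfsF n m fuel g d.1 d.2).2 a b = 0 ∧ pvReach n m G s (a, b) := by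
        intro a b h
        by_cases he : (pvDfsF n m fuel g d.1 d.2).2 a b = g a b
        · rw [he] at h ⊢; exact I1 a b h
        · obtain ⟨hz, hr⟩ := P1 a b he
          refine ⟨hz, pvReach_lift hreach_d hsubz ?_⟩
          simpa using hr
      have hI2' : ∀ c : Int × Int, (c = s ∨ (G c.1 c.2 ≠ 0 ∧ (pvDfsF n m fuel g d.1 d.2).2 c.1 c.2 = 0)) →
          ∀ e ∈ pvNbrs c, 0 ≤ e.1 → e.1 < n → 0 ≤ e.2 → e.2 < m →
            (pvDfsF n m fuel g d.1 d.2).2 e.1 e.2 = 0 ∨ (c = s ∧ e ∈ t) := by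
        intro c hc e he hb1 hb2 hb3 hb4
        by_cases hgc : c = s ∨ (G c.1 c.2 ≠ 0 ∧ g c.1 c.2 = 0)
        · rcases I2 c hgc e he hb1 hb2 hb3 hb4 with hz | ⟨hcs, hmem⟩
          · exact Or.inl (hper _ _ hz)
          · rcases List.mem_cons.mp hmem with rfl | hm
            · exact Or.inl (by simpa using P4)
            · exact Or.inr ⟨hcs, hm⟩
        · rcases hc with rfl | ⟨hGc, hrc⟩
          · exact absurd (Or.inl rfl) hgc
          · have hgc' : g c.1 c.2 ≠ 0 := fun h0 => hgc (Or.inr ⟨hGc, h0⟩)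
            exact Or.inl (P3 c (Or.inr ⟨hgc', hrc⟩) (by simp) e he hb1 hb2 hb3 hb4)
      have H := ih (fun e he => hsub e (by simp [he]))
        (total + (pvDfsF n m fuel g d.1 d.2).1) (pvDfsF n m fuel g d.1 d.2).2
        hI1' hI2' (hper _ _ I3)
        (le_trans (pvCnt_mono n m g _ (fun a b h => (P1 a b h).1)) Icnt)
      refine ⟨H.1, ?_⟩
      rw [H.2]
      omega
    · rw [if_neg hcond]
      refine ih (fun e he => hsub e (by simp [he])) total g I1 ?_ I3 Icnt
      intro c hc e he hb1 hb2 hb3 hb4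
      rcases I2 c hc e he hb1 hb2 hb3 hb4 with hz | ⟨hcs, hmem⟩
      · exact Or.inl hz
      · rcases List.mem_cons.mp hmem with rfl | hm
        · have : g e.1 e.2 = 0 := by
            by_contra hnz; exact hcond ⟨hb1, hb2, hb3, hb4, hnz⟩
          exact Or.inl this
        · exact Or.inr ⟨hcs, hm⟩

lemma pvDfsF_spec (n m : Int) :
    ∀ (fuel : Nat) (g : Int → Int → Int) (x y : Int),
    0 ≤ x → x < n → 0 ≤ y → y < m → g x y ≠ 0 → pvCnt n m g ≤ fuel →
    pvInv n m g (x, y) [] (pvDfsF n m fuel g x y).2 ∧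
    (pvDfsF n m fuel g x y).1 = pvT n m g - pvT n m (pvDfsF n m fuel g x y).2 := by
  intro fuel
  induction fuel with
  | zero =>
    intro g x y h0 h1 h2 h3 hnz hcnt
    exact absurd hcnt (by have := pvCnt_pos n m x y g h0 h1 h2 h3 hnz; omega)
  | succ k ih =>
    intro g x y h0 h1 h2 h3 hnz hcnt
    have hcnt' : pvCnt n m (pvUpd g x y) ≤ k := by
      have := pvCnt_upd n m x y g h0 h1 h2 h3 hnz
      omega
    have hI1 : ∀ a b : Int, pvUpd g x y a b ≠ g a b →
        pvUpd g x y a b = 0 ∧ pvReach n m g (x, y) (a, b) := by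
      intro a b hne
      by_cases hab : a = x ∧ b = y
      · obtain ⟨rfl, rfl⟩ := hab
        exact ⟨by simp [pvUpd], pvReach.refl⟩
      · rw [show pvUpd g x y a b = g a b from by simp [pvUpd, hab]] at hne
        exact absurd rfl hne
    have hI2 : ∀ c : Int × Int, (c = (x, y) ∨ (g c.1 c.2 ≠ 0 ∧ pvUpd g x y c.1 c.2 = 0)) →
        ∀ d ∈ pvNbrs c, 0 ≤ d.1 → d.1 < n → 0 ≤ d.2 → d.2 < m →
          pvUpd g x y d.1 d.2 = 0 ∨ (c = (x, y) ∧ d ∈ pvNbrs (x, y)) := by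
      intro c hc d hd _ _ _ _
      have hcs : c = (x, y) := by
        rcases hc with rfl | ⟨hnz', hz⟩
        · rfl
        · by_contra hne
          have hne' : ¬(c.1 = x ∧ c.2 = y) := by
            rintro ⟨ha, hb⟩; exact hne (Prod.ext ha hb)
          rw [show pvUpd g x y c.1 c.2 = g c.1 c.2 from by simp [pvUpd, hne']] at hz
          exact hnz' hz
      subst hcs
      exact Or.inr ⟨rfl, hd⟩
    have h := pvDfsN_spec n m k g (x, y) ih (pvNbrs (x, y)) (fun d hd => hd)
      (g x y) (pvUpd g x y) hI1 hI2 (by simp [pvUpd]) hcnt'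
    have hunf : pvDfsF n m (k + 1) g x y
        = pvDfsN n m k (pvNbrs (x, y)) (g x y) (pvUpd g x y) := by
      rw [pvDfsF]
    rw [hunf]
    refine ⟨h.1, ?_⟩
    rw [h.2, pvT_upd n m x y g h0 h1 h2 h3]
    ring

-- ===== glueing the two characterisations =====

lemma pvInv_zero_on_reach {n m : Int} {G : Int → Int → Int} {s : Int × Int}
    {g' : Int → Int → Int} (hInv : pvInv n m G s [] g') :
    ∀ d : Int × Int, pvReach n m G s d → g' d.1 d.2 = 0 := by
  intro d hd
  induction hd with
  | refl => exact hInv.2.2.2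
  | step hc hmem h1 h2 h3 h4 hG ih =>
    refine hInv.2.2.1 _ ?_ (by simp) _ hmem h1 h2 h3 h4
    rcases pvReach_src hc with h | h
    · exact Or.inl h
    · exact Or.inr ⟨h, ih⟩

lemma pvInv_keep {n m : Int} {G : Int → Int → Int} {s : Int × Int}
    {g' : Int → Int → Int} (hInv : pvInv n m G s [] g') :
    ∀ a b : Int, ¬ pvReach n m G s (a, b) → g' a b = G a b := by
  intro a b hn
  by_contra h
  exact hn (hInv.1 a b h).2

lemma pvFinal_ext {n m : Int} {G : Int → Int → Int} {s : Int × Int}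
    {g1 g2 : Int → Int → Int}
    (h1z : ∀ d : Int × Int, pvReach n m G s d → g1 d.1 d.2 = 0)
    (h1k : ∀ a b : Int, ¬ pvReach n m G s (a, b) → g1 a b = G a b)
    (h2z : ∀ d : Int × Int, pvReach n m G s d → g2 d.1 d.2 = 0)
    (h2k : ∀ a b : Int, ¬ pvReach n m G s (a, b) → g2 a b = G a b) : g1 = g2 := by
  funext a b
  by_cases h : pvReach n m G s (a, b)
  · rw [h1z (a, b) h, h2z (a, b) h]
  · rw [h1k a b h, h2k a b h]

lemma pvBfs_eq_dfs (n m : Int) (g : Int → Int → Int) (x y : Int)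
    (h0 : 0 ≤ x) (h1 : x < n) (h2 : 0 ≤ y) (h3 : y < m) (hnz : g x y ≠ 0) :
    pvBfs n m g x y = pvDfsF n m (pvCnt n m g) g x y := by
  have hA := pvBfsLoop_spec n m g (x, y) (g x y) [(x, y)] (pvUpd g x y) (pvInv_init n m g x y)
  have hB := pvDfsF_spec n m (pvCnt n m g) g x y h0 h1 h2 h3 hnz le_rfl
  have hg : (pvBfsLoop n m (g x y) [(x, y)] (pvUpd g x y)).2
      = (pvDfsF n m (pvCnt n m g) g x y).2 :=
    pvFinal_ext (pvInv_zero_on_reach hA.1) (pvInv_keep hA.1)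
      (pvInv_zero_on_reach hB.1) (pvInv_keep hB.1)
  have hv : (pvBfsLoop n m (g x y) [(x, y)] (pvUpd g x y)).1
      = (pvDfsF n m (pvCnt n m g) g x y).1 := by
    rw [hA.2, hB.2, hg, pvT_upd n m x y g h0 h1 h2 h3]
    ring
  unfold pvBfs
  exact Prod.ext hv hg

lemma pvFoldl_ext {α β : Type} (f1 f2 : β → α → β) :
    ∀ (l : List α), (∀ (b : β) (a : α), a ∈ l → f1 b a = f2 b a) →
    ∀ b : β, l.foldl f1 b = l.foldl f2 b := by
  intro l
  induction l with
  | nil => intro _ b; rfl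
  | cons x t ih =>
    intro h b
    simp only [List.foldl_cons]
    rw [h b x (by simp)]
    exact ih (fun b a ha => h b a (by simp [ha])) _

theorem funcs_eq : ∀ (nums : List (List Int)) (n m : Int), func nums n m = func_alt nums n m := by
  intro nums n m
  unfold func func_alt
  refine congrArg Prod.fst ?_
  apply pvFoldl_ext
  intro st i hi
  have hi' : 0 ≤ i ∧ i < n := by
    simp only [List.pure_def, List.bind_eq_flatMap, List.mem_flatMap, List.mem_range,
      List.mem_cons, List.not_mem_nil, or_false] at hi
    obtain ⟨a, ha, rfl⟩ := hi
    constructor <;> omega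
  apply pvFoldl_ext
  intro st' j hj
  have hj' : 0 ≤ j ∧ j < m := by
    simp only [List.pure_def, List.bind_eq_flatMap, List.mem_flatMap, List.mem_range,
      List.mem_cons, List.not_mem_nil, or_false] at hj
    obtain ⟨a, ha, rfl⟩ := hj
    constructor <;> omega
  by_cases h : st'.2 i j ≠ 0
  · simp only [if_pos h]
    rw [pvBfs_eq_dfs n m st'.2 i j hi'.1 hi'.2 hj'.1 hj'.2 h]
  · simp only [if_neg h]

-- ===== VERDICT (by name: the statement is the Claim_ definition above) =====
theorem func_spec : Claim_equal_func := by
  intro nums n m _hd _hp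
  exact funcs_eq nums n m
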